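-- pv_equiv track=rewrite | github.com/EnvyW6567/CodingTestAlgorithm | LEVEL_2/string_compression.py | calc_str_length
-- ===== SOURCE A (Python) =====
-- def calc_str_length(same_count_list, divide_length):
--     str_length = 0
--     for count in same_count_list:
--         if count == 1:
--             str_length += divide_length
--         else:
--             str_length += (divide_length + len(str(count)))
--
--     return str_length
-- ===== SOURCE B (Python) =====
-- def calc_str_length(same_count_list, divide_length):
--     freq = {}
--     for count in same_count_list:
--         freq[count] = freq.get(count, 0) + 1
--     total = len(same_count_list) * divide_length
--     for value, mult in freq.items():
--         if value != 1:
--             total += mult * len(str(value))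
--     return total
-- ===== Notes on version B (the rewrite author's own statement) =====
-- stated objective: alternative
-- what changed: B aggregates the counts into a frequency histogram (dict) first, adds the unconditional divide_length term once as len(list)*divide_length, and then adds mult*len(str(value)) once per DISTINCT non-1 value, instead of A's single pass that branches and recomputes str(count) for every element.
import Mathlib
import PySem

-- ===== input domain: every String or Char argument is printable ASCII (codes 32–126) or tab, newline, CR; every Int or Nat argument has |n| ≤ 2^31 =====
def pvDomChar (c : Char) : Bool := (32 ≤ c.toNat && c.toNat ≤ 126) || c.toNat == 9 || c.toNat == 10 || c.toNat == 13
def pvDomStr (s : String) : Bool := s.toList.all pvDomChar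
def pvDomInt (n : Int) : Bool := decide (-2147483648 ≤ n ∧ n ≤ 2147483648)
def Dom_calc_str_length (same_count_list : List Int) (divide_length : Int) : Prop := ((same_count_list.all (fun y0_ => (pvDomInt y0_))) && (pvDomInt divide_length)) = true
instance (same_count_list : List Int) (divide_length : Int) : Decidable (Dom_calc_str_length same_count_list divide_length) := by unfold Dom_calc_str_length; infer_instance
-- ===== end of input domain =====

-- B aggregates the counts into a frequency histogram first and adds the digit-length term once
-- per distinct non-1 value (objective: alternative decomposition of the same sum).

-- ===== PORT A =====
-- single loop with an accumulator and a per-element branch (literal port of A)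
def calc_str_length (same_count_list : List Int) (divide_length : Int) : Int :=
  same_count_list.foldl
    (fun str_length count =>
      if count = 1 then str_length + divide_length
      else str_length + (divide_length + (PySem.Int.toStr count).length))
    0

-- ===== PORT B =====
-- histogram pass ('freq[count] = freq.get(count, 0) + 1'), then 'len(list)*divide_length'
-- plus one digit-length term per distinct value from freq.items()
def calc_str_length_alt (same_count_list : List Int) (divide_length : Int) : Int :=
  let freq : PySem.Dict Int Int :=
    same_count_list.foldl (fun d c => d.insert c (d.getD c 0 + 1)) PySem.Dict.empty
  let total : Int := (same_count_list.length : Int) * divide_length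
  freq.items.foldl
    (fun total vm =>
      if vm.1 ≠ 1 then total + vm.2 * ((PySem.Int.toStr vm.1).length : Int) else total)
    total

-- ===== PRECONDITION & SPEC =====
def Spec_calc_str_length (same_count_list : List Int) (divide_length : Int) (out : Int) : Prop := out = calc_str_length_alt same_count_list divide_length
instance (same_count_list : List Int) (divide_length : Int) (out : Int) : Decidable (Spec_calc_str_length same_count_list divide_length out) := by unfold Spec_calc_str_length; infer_instance

-- ===== CLAIM (what is proved, stated in full; the proofs are below) =====
def Claim_equal_calc_str_length : Prop := ∀ (same_count_list : List Int) (divide_length : Int), Dom_calc_str_length same_count_list divide_length → Spec_calc_str_length same_count_list divide_length (calc_str_length same_count_list divide_length)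

-- ===== LEMMAS AND PROOFS =====

-- the per-element digit contribution (0 for count = 1)
def pvDigits (c : Int) : Int := if c = 1 then 0 else ((PySem.Int.toStr c).length : Int)

-- weighted sum over the distinct elements = plain sum over the list
theorem pv_dedup_weighted_sum (l : List Int) (f : Int → Int) :
    ((PySem.Set.ofList l).map (fun k => (l.count k : Int) * f k)).sum = (l.map f).sum := by
  have hnd : (PySem.Set.ofList l).Nodup := PySem.Set.nodup_ofList l
  have htf : (PySem.Set.ofList l).toFinset = l.toFinset := by
    ext x; simp [List.mem_toFinset, PySem.Set.mem_ofList]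
  calc ((PySem.Set.ofList l).map (fun k => (l.count k : Int) * f k)).sum
      = (PySem.Set.ofList l).toFinset.sum (fun k => (l.count k : Int) * f k) :=
        (List.sum_toFinset _ hnd).symm
    _ = l.toFinset.sum (fun k => (l.count k : Int) * f k) := by rw [htf]
    _ = (l.map f).sum := by
        rw [Finset.sum_list_map_count l f]
        refine Finset.sum_congr rfl (fun x _ => ?_)
        simp

theorem pv_A_closed (l : List Int) (d : Int) :
    calc_str_length l d = (l.length : Int) * d + (l.map pvDigits).sum := by
  unfold calc_str_length
  have h : ∀ (acc : Int) (c : Int), c ∈ l →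
      (if c = 1 then acc + d else acc + (d + ((PySem.Int.toStr c).length : Int)))
        = acc + (d + pvDigits c) := by
    intro acc c _
    unfold pvDigits
    split_ifs <;> ring
  rw [PySem.List.foldl_congr_mem _ _ _ _ h, PySem.List.foldl_add]
  have : (l.map fun c => d + pvDigits c).sum = (l.length : Int) * d + (l.map pvDigits).sum := by
    induction l with
    | nil => simp
    | cons x t ih => simp; ring
  rw [this]; ring

theorem pv_B_closed (l : List Int) (d : Int) :
    calc_str_length_alt l d = (l.length : Int) * d + (l.map pvDigits).sum := by
  show (List.foldl
      (fun total vm => if vm.1 ≠ 1 then total + vm.2 * ((PySem.Int.toStr vm.1).length : Int) else total)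
      ((l.length : Int) * d)
      (l.foldl (fun d c => d.insert c (d.getD c 0 + 1)) PySem.Dict.empty).items)
      = (l.length : Int) * d + (l.map pvDigits).sum
  rw [show (l.foldl (fun d c => d.insert c (d.getD c 0 + 1)) PySem.Dict.empty)
        = PySem.Dict.counter l from PySem.Dict.foldl_insert_getD_add_one_eq_counter l,
      PySem.Dict.items_counter]
  have h : ∀ (acc : Int) (vm : Int × Int),
      vm ∈ (PySem.Set.ofList l).map (fun k => (k, (l.count k : Int))) →
      (if vm.1 ≠ 1 then acc + vm.2 * ((PySem.Int.toStr vm.1).length : Int) else acc)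
        = acc + vm.2 * pvDigits vm.1 := by
    intro acc vm _
    unfold pvDigits
    split_ifs <;> simp_all
  rw [PySem.List.foldl_congr_mem _ _ _ _ h, PySem.List.foldl_add, List.map_map]
  have : ((PySem.Set.ofList l).map
      ((fun vm : Int × Int => vm.2 * pvDigits vm.1) ∘ fun k => (k, (l.count k : Int)))).sum
      = (l.map pvDigits).sum := by
    simpa [Function.comp] using pv_dedup_weighted_sum l pvDigits
  rw [this]

-- ===== VERDICT (by name: the statement is the Claim_ definition above) =====
theorem calc_str_length_spec : Claim_equal_calc_str_length := by
  intro l d _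
  unfold Spec_calc_str_length
  rw [pv_A_closed, pv_B_closed]
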